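-- pv_equiv track=rewrite | github.com/szolkiewicz/spd2023 | lab4/DPMethod.py | DP
-- ===== SOURCE A (Python) =====
-- def DP(_J):
--
--     J = _J.copy()
--     n = len(J)
--     mask = (1 << n)
--
--     memory = [-1 for _ in range(mask)]
--     memory[0] = 0
--     for D in range(1,mask):
--         TimeSum = 0
--         for i in range(0,n):
--             if D & (1<<i):
--                 TimeSum += J[i][0]
--         MinPenalty = float('inf')
--         for i in range(0,n):
--             if D & (1<<i):
--                 Penalty = max(TimeSum - J[i][2] ,0)* J[i][1] + memory[D ^ (1<<i)]
--                 MinPenalty = min(MinPenalty, Penalty)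
--         memory[D] = MinPenalty
--     return memory[mask-1]
-- ===== SOURCE B (Python) =====
-- def DP(_J):
--     n = len(_J)
--     cache = {0: 0}
--
--     def solve(D):
--         if D in cache:
--             return cache[D]
--         ts = sum(_J[i][0] for i in range(n) if D & (1 << i))
--         best = min(max(ts - _J[i][2], 0) * _J[i][1] + solve(D ^ (1 << i))
--                    for i in range(n) if D & (1 << i))
--         cache[D] = best
--         return best
--
--     return solve((1 << n) - 1)
-- ===== Notes on version B (the rewrite author's own statement) =====
-- stated objective: alternative
-- what changed: Replaces the bottom-up table over all 2^n masks with top-down memoized recursion from the full mask down the subset lattice, so no explicit memory array is preallocated and only reachable subsets are tabulated.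
import Mathlib
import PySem

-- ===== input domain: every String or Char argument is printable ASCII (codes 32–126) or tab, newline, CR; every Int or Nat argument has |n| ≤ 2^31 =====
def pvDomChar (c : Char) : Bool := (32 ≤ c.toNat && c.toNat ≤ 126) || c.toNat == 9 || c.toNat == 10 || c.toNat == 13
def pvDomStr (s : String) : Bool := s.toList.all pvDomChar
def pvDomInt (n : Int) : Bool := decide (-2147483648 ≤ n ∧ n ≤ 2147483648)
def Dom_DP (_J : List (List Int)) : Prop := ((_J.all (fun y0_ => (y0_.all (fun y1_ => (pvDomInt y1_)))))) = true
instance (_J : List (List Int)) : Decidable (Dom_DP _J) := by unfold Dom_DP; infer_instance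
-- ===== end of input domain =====

-- B replaces A's bottom-up table over all masks by top-down recursion over subsets
-- (memoized in Python; ported as plain well-founded recursion with the same arithmetic).

-- ===== PORT A =====
-- One iteration of A's outer 'for D in range(1, mask)' loop: computes TimeSum, then
-- MinPenalty (Option Int models float('inf') as none; for D ≥ 1 some bit is set so it
-- is always 'some'; the unreachable 'none' is stored as -1), then memory[D] = MinPenalty.
def aStep (J : List (List Int)) (n : Nat) (memory : List Int) (D : Nat) : List Int :=
  let TimeSum : Int := (List.range n).foldl
    (fun t i => if D &&& (1 <<< i) != 0 then t + (J.getD i []).getD 0 0 else t) 0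
  let MinPenalty : Option Int := (List.range n).foldl
    (fun m i => if D &&& (1 <<< i) != 0 then
        some (match m with
          | none => max (TimeSum - (J.getD i []).getD 2 0) 0 * (J.getD i []).getD 1 0
              + memory.getD (D ^^^ (1 <<< i)) 0
          | some v => min v (max (TimeSum - (J.getD i []).getD 2 0) 0 * (J.getD i []).getD 1 0
              + memory.getD (D ^^^ (1 <<< i)) 0))
      else m) none
  memory.set D (MinPenalty.getD (-1))

def DP (_J : List (List Int)) : Int :=
  let J := _J
  let n := J.length
  let mask := 1 <<< n
  let memory : List Int := ((List.range mask).map (fun _ => (-1 : Int))).set 0 0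
  let memory := (List.range' 1 (mask - 1)).foldl (aStep J n) memory
  memory.getD (mask - 1) 0

-- ===== PORT B =====
-- Termination of the top-down recursion: clearing a set bit strictly decreases the mask.
theorem pv_xor_lt {n i : Nat} (h : n.testBit i = true) : n ^^^ (1 <<< i) < n := by
  have h2 : (1 : Nat) <<< i = 2 ^ i := by simp [Nat.shiftLeft_eq]
  rw [h2]
  apply Nat.lt_of_testBit i
  · simp [Nat.testBit_xor, h, Nat.testBit_two_pow]
  · exact h
  · intro j hj
    simp [Nat.testBit_xor, Nat.testBit_two_pow, Nat.ne_of_lt hj]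

theorem pv_bit_of_mem {D n i : Nat}
    (hi : i ∈ (List.range n).filter (fun i => D &&& (1 <<< i) != 0)) :
    D.testBit i = true := by
  have := (List.mem_filter.mp hi).2
  simp only [bne_iff_ne, ne_eq] at this
  rw [Nat.shiftLeft_eq, one_mul] at this
  rw [Nat.and_two_pow] at this
  cases hb : D.testBit i with
  | true => rfl
  | false => simp [hb] at this

-- solve(D) of Source B: the Python memo cache only avoids recomputation and does not
-- change any value, so it is ported as plain recursion on D (same arithmetic, same order).
def solveB (J : List (List Int)) (n : Nat) (D : Nat) : Int :=
  if D = 0 then 0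
  else
    let bits := (List.range n).filter (fun i => D &&& (1 <<< i) != 0)
    let ts : Int := bits.foldl (fun t i => t + (J.getD i []).getD 0 0) 0
    let cands := bits.attach.map (fun x =>
      max (ts - (J.getD x.1 []).getD 2 0) 0 * (J.getD x.1 []).getD 1 0
        + solveB J n (D ^^^ (1 <<< x.1)))
    match cands with
    | [] => 0          -- unreachable: Python's min would raise, but D ≠ 0 with D < 2^n has a set bit
    | c :: cs => cs.foldl min c
termination_by D
decreasing_by exact pv_xor_lt (pv_bit_of_mem x.2)

def DP_alt (_J : List (List Int)) : Int :=
  solveB _J _J.length ((1 <<< _J.length) - 1)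

-- ===== PRECONDITION & SPEC =====
-- Pre_ excludes inputs containing a row of fewer than 3 entries: on those (when the row's
-- bit participates, i.e. the list is nonempty) Python A raises IndexError.
def Pre_DP (_J : List (List Int)) : Prop := ∀ r ∈ _J, 3 ≤ r.length
instance (_J : List (List Int)) : Decidable (Pre_DP _J) := by unfold Pre_DP; infer_instance
def pvWitness_DP : List (List Int) := [[2, 3, 1], [1, 1, 2]]

def Spec_DP (_J : List (List Int)) (out : Int) : Prop := out = DP_alt _J
instance (_J : List (List Int)) (out : Int) : Decidable (Spec_DP _J out) := by unfold Spec_DP; infer_instance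

-- ===== CLAIM (what is proved, stated in full; the proofs are below) =====
def Claim_equal_DP : Prop := ∀ (_J : List (List Int)), Dom_DP _J → Pre_DP _J → Spec_DP _J (DP _J)

-- ===== LEMMAS AND PROOFS =====

-- Python's min(inf, ·) chain as an Option Int fold collapses to a plain min fold.
theorem optmin_fold_some (ps : List Int) (v : Int) :
    ps.foldl (fun m p => some (match m with | none => p | some w => min w p)) (some v)
      = some (ps.foldl min v) := by
  induction ps generalizing v with
  | nil => rfl
  | cons p ps ih => simp [List.foldl_cons, ih]

theorem optmin_fold_none (ps : List Int) :
    ps.foldl (fun m p => some (match m with | none => p | some w => min w p)) none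
      = match ps with | [] => none | c :: cs => some (cs.foldl min c) := by
  cases ps with
  | nil => rfl
  | cons c cs => simp [List.foldl_cons, optmin_fold_some]

theorem bits_ne_nil {D n : Nat} (hD : D ≠ 0) (hlt : D < 2 ^ n) :
    (List.range n).filter (fun i => D &&& (1 <<< i) != 0) ≠ [] := by
  obtain ⟨i, hi, _⟩ := Nat.exists_most_significant_bit hD
  have hin : i < n := by
    by_contra h
    push_neg at h
    have : D < 2 ^ i := lt_of_lt_of_le hlt (Nat.pow_le_pow_right (by omega) h)
    simp [Nat.testBit_eq_false_of_lt this] at hi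
  intro hnil
  have hmem : i ∈ (List.range n).filter (fun i => D &&& (1 <<< i) != 0) := by
    refine List.mem_filter.mpr ⟨List.mem_range.mpr hin, ?_⟩
    simp only [bne_iff_ne, ne_eq]
    rw [Nat.shiftLeft_eq, one_mul, Nat.and_two_pow, hi]
    have h2 : (2 : Nat) ^ i ≠ 0 := by positivity
    simp [h2]
  rw [hnil] at hmem
  exact absurd hmem (List.not_mem_nil)

-- The inner 'if bit set' fold is the fold over the filtered index list.
theorem foldl_if_match (p : Nat → Bool) (E : Nat → Int) (l : List Nat) :
    l.foldl (fun m i => if p i then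
        some (match m with | none => E i | some v => min v (E i)) else m) none
      = (l.filter p).foldl
        (fun m i => some (match m with | none => E i | some v => min v (E i))) none := by
  rw [PySem.List.foldl_if_eq_foldl_filter]

theorem minfold_eq (l : List Nat) (E E' : Nat → Int) (h : ∀ i ∈ l, E i = E' i) :
    l.foldl (fun m i => some (match m with | none => E i | some v => min v (E i))) none
      = l.foldl (fun m i => some (match m with | none => E' i | some v => min v (E' i))) none := by
  apply PySem.List.foldl_congr_mem
  intro acc i hi
  rw [h i hi]

theorem optmin_over (l : List Nat) (E : Nat → Int) :
    l.foldl (fun m i => some (match m with | none => E i | some v => min v (E i))) none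
      = match l.map E with | [] => none | c :: cs => some (cs.foldl min c) := by
  rw [← optmin_fold_none, List.foldl_map]

-- One A-step equals writing solveB's value, given memory is correct below D.
theorem step_eq (J : List (List Int)) (memory : List Int) (D : Nat)
    (hD : D ≠ 0) (hlt : D < 2 ^ J.length)
    (hmem : ∀ d < D, memory.getD d 0 = solveB J J.length d) :
    aStep J J.length memory D = memory.set D (solveB J J.length D) := by
  unfold aStep
  rw [solveB]
  simp only [hD, if_false]
  set bits := (List.range J.length).filter (fun i => D &&& (1 <<< i) != 0) with hbits
  have hts : (List.range J.length).foldl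
      (fun t i => if D &&& (1 <<< i) != 0 then t + (J.getD i []).getD 0 0 else t) 0
      = bits.foldl (fun t i => t + (J.getD i []).getD 0 0) 0 := by
    rw [hbits, PySem.List.foldl_if_eq_foldl_filter]
  rw [hts]
  set ts := bits.foldl (fun t i => t + (J.getD i []).getD 0 0) 0 with hts'
  congr 1
  rw [foldl_if_match (p := fun i => D &&& (1 <<< i) != 0)
      (E := fun i => max (ts - (J.getD i []).getD 2 0) 0 * (J.getD i []).getD 1 0
        + memory.getD (D ^^^ (1 <<< i)) 0)]
  rw [← hbits]
  rw [minfold_eq bits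
      (fun i => max (ts - (J.getD i []).getD 2 0) 0 * (J.getD i []).getD 1 0
        + memory.getD (D ^^^ (1 <<< i)) 0)
      (fun i => max (ts - (J.getD i []).getD 2 0) 0 * (J.getD i []).getD 1 0
        + solveB J J.length (D ^^^ (1 <<< i)))
      (by
        intro i hi
        have hbit := pv_bit_of_mem (hbits ▸ hi)
        simp only [hmem _ (pv_xor_lt hbit)])]
  rw [optmin_over]
  have hmap : bits.attach.map (fun x =>
      max (ts - (J.getD x.1 []).getD 2 0) 0 * (J.getD x.1 []).getD 1 0
        + solveB J J.length (D ^^^ (1 <<< x.1)))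
      = bits.map (fun i =>
      max (ts - (J.getD i []).getD 2 0) 0 * (J.getD i []).getD 1 0
        + solveB J J.length (D ^^^ (1 <<< i))) := by
    simp
  rw [hmap]
  have hne : bits ≠ [] := bits_ne_nil hD hlt
  cases hmb : bits.map (fun i =>
      max (ts - (J.getD i []).getD 2 0) 0 * (J.getD i []).getD 1 0
        + solveB J J.length (D ^^^ (1 <<< i))) with
  | nil => exact absurd (List.map_eq_nil_iff.mp hmb) hne
  | cons c cs => rfl

-- Fold invariant for A's outer loop.
theorem fold_inv (J : List (List Int)) (cnt : Nat) : ∀ (start : Nat) (memory : List Int),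
    1 ≤ start → start + cnt ≤ 2 ^ J.length →
    memory.length = 2 ^ J.length →
    (∀ d < start, memory.getD d 0 = solveB J J.length d) →
    ((List.range' start cnt).foldl (aStep J J.length) memory).length = 2 ^ J.length ∧
    (∀ d < start + cnt,
      ((List.range' start cnt).foldl (aStep J J.length) memory).getD d 0 = solveB J J.length d) := by
  induction cnt with
  | zero => intro start memory _ _ hlen hmem; simpa using ⟨hlen, hmem⟩
  | succ k ih =>
    intro start memory hs hb hlen hmem
    have hD : start ≠ 0 := by omega
    have hlt : start < 2 ^ J.length := by omega
    have hstep := step_eq J memory start hD hlt hmem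
    have hrange : List.range' start (k + 1) = start :: List.range' (start + 1) k := by
      simp [List.range'_succ]
    rw [hrange, List.foldl_cons, hstep]
    have hlen' : (memory.set start (solveB J J.length start)).length = 2 ^ J.length := by
      simpa using hlen
    have hmem' : ∀ d < start + 1,
        (memory.set start (solveB J J.length start)).getD d 0 = solveB J J.length d := by
      intro d hd
      by_cases hds : d = start
      · subst hds
        have hdl : d < memory.length := by omega
        simp [List.getD, hdl]
      · have hd' : d < start := by omega
        have heq : (memory.set start (solveB J J.length start)).getD d 0 = memory.getD d 0 := by
          simp [List.getD, Ne.symm hds]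
        rw [heq]; exact hmem d hd'
    have hrec := ih (start + 1) (memory.set start (solveB J J.length start))
      (by omega) (by omega) hlen' hmem'
    refine ⟨hrec.1, ?_⟩
    intro d hd
    exact hrec.2 d (by omega)

-- ===== VERDICT (by name: the statement is the Claim_ definition above) =====
theorem DP_spec : Claim_equal_DP := by
  intro _J _ _
  unfold Spec_DP DP DP_alt
  show ((List.range' 1 ((1 <<< _J.length) - 1)).foldl (aStep _J _J.length)
      (((List.range (1 <<< _J.length)).map (fun _ => (-1 : Int))).set 0 0)).getD
      ((1 <<< _J.length) - 1) 0
    = solveB _J _J.length ((1 <<< _J.length) - 1)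
  have hmask : (1 : Nat) <<< _J.length = 2 ^ _J.length := by simp [Nat.shiftLeft_eq]
  rw [hmask]
  have hpos : 1 ≤ 2 ^ _J.length := Nat.one_le_two_pow
  set memory0 : List Int := ((List.range (2 ^ _J.length)).map (fun _ => (-1 : Int))).set 0 0 with hm0
  have hlen0 : memory0.length = 2 ^ _J.length := by simp [hm0]
  have hmem0 : ∀ d < 1, memory0.getD d 0 = solveB _J _J.length d := by
    intro d hd
    interval_cases d
    rw [solveB]
    have h0 : (0 : Nat) < memory0.length := by omega
    simp [hm0, List.getD]
  have hinv := fold_inv _J (2 ^ _J.length - 1) 1 memory0 (le_refl 1) (by omega) hlen0 hmem0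
  exact hinv.2 (2 ^ _J.length - 1) (by omega)
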